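-- pv_equiv track=rewrite | github.com/green-fox-academy/Unicorn-raya | week-03/day-03/functions.py | search_by_product_name
-- ===== SOURCE A (Python) =====
-- def search_by_product_name(p_name,p_names,prices,qtys):
--     price_list = []
--     qtys_list = []
--     for index in range(len(p_names)):
--         if p_names[index] == p_name:
--             price_list.append(prices[index])
--             qtys_list.append(qtys[index])
--     result_string = []
--     for index in range(len(price_list)):
--         tmp = "prices :" + price_list[index] + " qtys: "+qtys_list[index]
--         result_string.append(tmp)
--     return result_string
-- ===== SOURCE B (Python) =====
-- def search_by_product_name(p_name, p_names, prices, qtys):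
--     # build a name -> indices hash index once, then format only the group for p_name
--     index = {}
--     for i, name in enumerate(p_names):
--         index.setdefault(name, []).append(i)
--     return ["prices :" + prices[i] + " qtys: " + qtys[i]
--             for i in index.get(p_name, [])]
-- ===== Notes on version B (the rewrite author's own statement) =====
-- stated objective: alternative
-- what changed: B replaces A's two staged passes over parallel price/qty lists with a dict-based grouping: one pass builds a name -> index-list hash index via setdefault, and the result is formatted directly from the group looked up for p_name.
import Mathlib
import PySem

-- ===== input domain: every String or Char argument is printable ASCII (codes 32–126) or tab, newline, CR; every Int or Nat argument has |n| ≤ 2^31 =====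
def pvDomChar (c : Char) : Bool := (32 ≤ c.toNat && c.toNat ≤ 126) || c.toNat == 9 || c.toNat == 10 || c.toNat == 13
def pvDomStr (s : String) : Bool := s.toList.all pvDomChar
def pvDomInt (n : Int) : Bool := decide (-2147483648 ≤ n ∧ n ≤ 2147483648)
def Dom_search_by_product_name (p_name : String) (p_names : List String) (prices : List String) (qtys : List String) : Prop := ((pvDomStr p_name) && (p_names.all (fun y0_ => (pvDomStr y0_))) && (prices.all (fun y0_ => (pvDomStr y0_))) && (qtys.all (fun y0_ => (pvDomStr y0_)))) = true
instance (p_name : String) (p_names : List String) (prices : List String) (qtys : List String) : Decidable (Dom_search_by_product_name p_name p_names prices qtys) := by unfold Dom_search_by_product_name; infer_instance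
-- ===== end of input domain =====

-- B replaces A's two staged passes over parallel price/qty lists with a dict-based
-- grouping: one pass builds a name -> index-list hash index, and the result is
-- formatted from the group looked up for p_name (objective: alternative).

-- ===== PORT A =====
def search_by_product_name (p_name : String) (p_names : List String) (prices : List String) (qtys : List String) : List String :=
  let lists := (PySem.List.pyRange 0 (p_names.length : Int) 1).foldl
    (fun (acc : List String × List String) index =>
      if PySem.List.pyGetD p_names index "" == p_name then
        (acc.1 ++ [PySem.List.pyGetD prices index ""], acc.2 ++ [PySem.List.pyGetD qtys index ""])
      else acc) ([], [])
  (PySem.List.pyRange 0 (lists.1.length : Int) 1).foldl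
    (fun (acc : List String) index =>
      acc ++ ["prices :" ++ PySem.List.pyGetD lists.1 index "" ++ " qtys: " ++ PySem.List.pyGetD lists.2 index ""]) []

-- ===== PORT B =====
def search_by_product_name_alt (p_name : String) (p_names : List String) (prices : List String) (qtys : List String) : List String :=
  let index := (PySem.List.enumerate p_names 0).foldl
    (fun (d : PySem.Dict String (List Int)) p => d.modify p.2 [] (· ++ [p.1]))
    PySem.Dict.empty
  (index.getD p_name []).map
    (fun i => "prices :" ++ PySem.List.pyGetD prices i "" ++ " qtys: " ++ PySem.List.pyGetD qtys i "")

-- ===== PRECONDITION & SPEC =====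
-- Pre_ excludes exactly the inputs where A raises IndexError: a matching name at an index
-- with no corresponding price or quantity.
def Pre_search_by_product_name (p_name : String) (p_names : List String) (prices : List String) (qtys : List String) : Prop :=
  ∀ i : Nat, i < p_names.length → p_names.getD i "" = p_name → i < prices.length ∧ i < qtys.length
instance (p_name : String) (p_names : List String) (prices : List String) (qtys : List String) : Decidable (Pre_search_by_product_name p_name p_names prices qtys) := by unfold Pre_search_by_product_name; infer_instance
def pvWitness_search_by_product_name : String × List String × List String × List String :=
  ("a", ["a", "b", "a"], ["1", "2", "3"], ["x", "y", "z"])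

def Spec_search_by_product_name (p_name : String) (p_names : List String) (prices : List String) (qtys : List String) (out : List String) : Prop := out = search_by_product_name_alt p_name p_names prices qtys
instance (p_name : String) (p_names : List String) (prices : List String) (qtys : List String) (out : List String) : Decidable (Spec_search_by_product_name p_name p_names prices qtys out) := by unfold Spec_search_by_product_name; infer_instance

-- ===== CLAIM (what is proved, stated in full; the proofs are below) =====
def Claim_equal_search_by_product_name : Prop := ∀ (p_name : String) (p_names : List String) (prices : List String) (qtys : List String), Dom_search_by_product_name p_name p_names prices qtys → Pre_search_by_product_name p_name p_names prices qtys → Spec_search_by_product_name p_name p_names prices qtys (search_by_product_name p_name p_names prices qtys)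

-- ===== LEMMAS AND PROOFS =====

-- canonical form both ports are reduced to: the matching indices, each formatted
def sbpnIdxs (p_name : String) (p_names : List String) : List Nat :=
  (List.range p_names.length).filter (fun i => p_names.getD i "" == p_name)

def sbpnFmt (prices qtys : List String) (i : Nat) : String :=
  "prices :" ++ prices.getD i "" ++ " qtys: " ++ qtys.getD i ""

-- a fold with independent componentwise appends is the pair of the two folds
theorem sbpn_pair_fold (p : Nat → Bool) (f g : Nat → String) :
    ∀ (l : List Nat) (acc : List String × List String),
    l.foldl (fun (acc : List String × List String) k =>
      if p k then (acc.1 ++ [f k], acc.2 ++ [g k]) else acc) acc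
    = (l.foldl (fun a k => if p k then a ++ [f k] else a) acc.1,
       l.foldl (fun a k => if p k then a ++ [g k] else a) acc.2) := by
  intro l
  induction l with
  | nil => intro acc; rfl
  | cons x xs ih =>
    intro acc
    by_cases hx : p x <;> simp [hx, ih]

-- A's result is the canonical form
theorem sbpn_A_canon (p_name : String) (p_names prices qtys : List String) :
    search_by_product_name p_name p_names prices qtys
    = (sbpnIdxs p_name p_names).map (sbpnFmt prices qtys) := by
  unfold search_by_product_name
  simp only [PySem.List.pyRange_zero_nat, List.foldl_map, PySem.List.pyGetD_natCast]
  rw [sbpn_pair_fold (fun k => p_names.getD k "" == p_name)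
        (fun k => prices.getD k "") (fun k => qtys.getD k "")]
  simp only [PySem.List.foldl_append_if, List.nil_append]
  rw [show (((List.range p_names.length).filter (fun i => p_names.getD i "" == p_name)).map
        (fun k => prices.getD k "")).length
      = ((sbpnIdxs p_name p_names).map (fun k => prices.getD k "")).length from rfl]
  simp only [List.length_map]
  rw [PySem.List.foldl_append_singleton_eq_map, List.nil_append]
  apply List.ext_getElem (by simp)
  intro n h1 h2
  simp only [List.getElem_map, List.getElem_range, sbpnFmt, sbpnIdxs]
  have hn : n < ((List.range p_names.length).filter (fun i => p_names.getD i "" == p_name)).length := by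
    simpa [sbpnIdxs] using h2
  rw [List.getD_eq_getElem _ _ (by simpa using hn), List.getD_eq_getElem _ _ (by simpa using hn)]
  simp

-- B's result is the canonical form
theorem sbpn_B_canon (p_name : String) (p_names prices qtys : List String) :
    search_by_product_name_alt p_name p_names prices qtys
    = (sbpnIdxs p_name p_names).map (sbpnFmt prices qtys) := by
  simp only [search_by_product_name_alt]
  have hswap : (PySem.List.enumerate p_names 0).foldl
      (fun (d : PySem.Dict String (List Int)) p => d.modify p.2 [] (· ++ [p.1]))
      PySem.Dict.empty
    = ((PySem.List.enumerate p_names 0).map Prod.swap).foldl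
      (fun (d : PySem.Dict String (List Int)) p => d.modify p.1 [] (· ++ [p.2]))
      PySem.Dict.empty := by
    rw [List.foldl_map]; simp [Prod.swap]
  rw [hswap, PySem.Dict.getD_foldl_modify_append, PySem.Dict.getD_empty, List.nil_append]
  rw [PySem.List.enumerate_eq_map_pyRange (d := "")]
  simp only [PySem.List.len, PySem.List.pyRange_zero_nat]
  simp only [List.map_map, List.filter_map, List.map_map]
  simp only [Function.comp_def, Prod.swap, PySem.List.pyGetD_natCast, sbpnIdxs]
  simp [sbpnFmt]

-- ===== VERDICT (by name: the statement is the Claim_ definition above) =====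
theorem search_by_product_name_spec : Claim_equal_search_by_product_name := by
  intro p_name p_names prices qtys _ _
  unfold Spec_search_by_product_name
  rw [sbpn_A_canon, sbpn_B_canon]
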